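-- pv_equiv track=rewrite | github.com/mihir-s-05/debate-v-majority | shared.py | most_frequent_answer
-- ===== SOURCE A (Python) =====
-- from collections import Counter
--
-- def most_frequent_answer(answers: list[str | None] | None) -> str | None:
--     """Return the most frequent answer, or None if no clear majority."""
--     if not answers:
--         return None
--     # Ignore unparsable outputs when voting. Treating `None` as a normal category
--     # makes voting unnecessarily brittle (e.g., [None, None, "C"] would otherwise
--     # return None even though the model produced a valid answer).
--     filtered = [a for a in answers if a is not None]
--     if not filtered:
--         return None
--     counts = Counter(filtered)
--     top_count = max(counts.values(), default=0)
--     if top_count <= 1: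
--         return None
--     top = [ans for ans, count in counts.items() if count == top_count]
--     return top[0] if len(top) == 1 else None
-- ===== SOURCE B (Python) =====
-- def most_frequent_answer(answers):
--     """Return the most frequent answer, or None if no clear majority."""
--     if not answers:
--         return None
--     vals = sorted(a for a in answers if a is not None)
--     if not vals:
--         return None
--     # run-length scan over the sorted values: one (answer, run length) pair per distinct answer
--     runs = []
--     i, n = 0, len(vals)
--     while i < n:
--         j = i
--         while j < n and vals[j] == vals[i]:
--             j += 1
--         runs.append((vals[i], j - i))
--         i = j
--     best = max(r for _, r in runs)
--     if best <= 1: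
--         return None
--     top = [a for a, r in runs if r == best]
--     return top[0] if len(top) == 1 else None
-- ===== Notes on version B (the rewrite author's own statement) =====
-- stated objective: alternative
-- what changed: Replaces Counter hash-counting with sort-then-run-length: the non-None answers are sorted and scanned once, each run of equal values yielding a (answer, run length) pair; the >=2 threshold and strict-uniqueness-of-the-maximum rules are then applied to the runs.
import Mathlib
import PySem

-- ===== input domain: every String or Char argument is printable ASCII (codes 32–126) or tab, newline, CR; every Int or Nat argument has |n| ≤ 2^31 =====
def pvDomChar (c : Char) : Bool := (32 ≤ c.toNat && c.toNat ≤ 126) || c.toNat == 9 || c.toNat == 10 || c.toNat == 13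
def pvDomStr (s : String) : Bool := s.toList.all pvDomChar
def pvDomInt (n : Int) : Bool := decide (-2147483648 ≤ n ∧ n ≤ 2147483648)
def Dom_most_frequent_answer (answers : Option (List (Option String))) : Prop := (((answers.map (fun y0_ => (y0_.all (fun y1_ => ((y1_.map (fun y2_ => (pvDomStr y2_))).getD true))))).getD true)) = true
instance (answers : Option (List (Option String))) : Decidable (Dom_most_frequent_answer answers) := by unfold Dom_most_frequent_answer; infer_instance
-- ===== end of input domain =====

-- B replaces Counter hash-counting by sort-then-run-length scan (alternative algorithm, same results).

-- ===== PORT A =====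
def most_frequent_answer (answers : Option (List (Option String))) : Option String :=
  match answers with
  | none => none
  | some l =>
    if l = [] then none
    else
      let filtered := l.filterMap id
      if filtered = [] then none
      else
        let counts := PySem.Dict.counter filtered
        let top_count := (PySem.List.max? counts.values (fun v => v)).getD 0
        if top_count ≤ 1 then none
        else
          let top := (counts.items.filter (fun p => p.2 == top_count)).map Prod.fst
          if top.length = 1 then PySem.List.pyGet? top 0 else none

-- ===== PORT B =====
-- the run-length scan over the sorted list (the two nested while loops of Source B)
def bRuns : List String → List (String × Int)
  | [] => []
  | x :: xs =>
    (x, ((xs.takeWhile (fun y => y == x)).length : Int) + 1) ::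
      bRuns (xs.dropWhile (fun y => y == x))
termination_by l => l.length
decreasing_by
  simp only [List.length_cons]
  exact Nat.lt_succ_of_le (List.length_dropWhile_le _ _)

def most_frequent_answer_alt (answers : Option (List (Option String))) : Option String :=
  match answers with
  | none => none
  | some l =>
    if l = [] then none
    else
      let vals := PySem.List.sorted (l.filterMap id) (fun x => x) false
      if vals = [] then none
      else
        let runs := bRuns vals
        let best := (PySem.List.max? (runs.map Prod.snd) (fun v => v)).getD 0
        if best ≤ 1 then none
        else
          let top := (runs.filter (fun p => p.2 == best)).map Prod.fst
          if top.length = 1 then PySem.List.pyGet? top 0 else none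

-- ===== PRECONDITION & SPEC =====
def Spec_most_frequent_answer (answers : Option (List (Option String))) (out : Option String) : Prop := out = most_frequent_answer_alt answers
instance (answers : Option (List (Option String))) (out : Option String) : Decidable (Spec_most_frequent_answer answers out) := by unfold Spec_most_frequent_answer; infer_instance

-- ===== CLAIM (what is proved, stated in full; the proofs are below) =====
def Claim_equal_most_frequent_answer : Prop := ∀ (answers : Option (List (Option String))), Dom_most_frequent_answer answers → Spec_most_frequent_answer answers (most_frequent_answer answers)

-- ===== LEMMAS AND PROOFS =====

-- the common tail of both ports: max of counts, ≥2 threshold, unique argmax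
def pvDecide (L : List (String × Int)) : Option String :=
  let m := (PySem.List.max? (L.map Prod.snd) (fun v => v)).getD 0
  if m ≤ 1 then none
  else
    let top := (L.filter (fun p => p.2 == m)).map Prod.fst
    if top.length = 1 then PySem.List.pyGet? top 0 else none

lemma pvDecide_perm (L1 L2 : List (String × Int)) (h : L1.Perm L2) :
    pvDecide L1 = pvDecide L2 := by
  have hm : (PySem.List.max? (L1.map Prod.snd) (fun v => v)).getD 0
      = (PySem.List.max? (L2.map Prod.snd) (fun v => v)).getD 0 := by
    have hp := h.map Prod.snd
    cases hL1 : PySem.List.max? (L1.map Prod.snd) (fun v => v) with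
    | none =>
      have h1 : L1.map Prod.snd = [] := (PySem.List.max?_eq_none_iff _ _).mp hL1
      have h2 : L2.map Prod.snd = [] := by
        rw [h1] at hp; exact hp.symm.eq_nil
      rw [show PySem.List.max? (L2.map Prod.snd) (fun v => v) = none from
        (PySem.List.max?_eq_none_iff _ _).mpr h2]
    | some m1 =>
      cases hL2 : PySem.List.max? (L2.map Prod.snd) (fun v => v) with
      | none =>
        have h2 : L2.map Prod.snd = [] := (PySem.List.max?_eq_none_iff _ _).mp hL2
        rw [h2] at hp
        have h1 : L1.map Prod.snd = [] := hp.eq_nil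
        rw [h1, (PySem.List.max?_eq_none_iff _ _).mpr rfl] at hL1
        cases hL1
      | some m2 =>
        have hmem1 : m1 ∈ L1.map Prod.snd := PySem.List.max?_mem hL1
        have hmem2 : m2 ∈ L2.map Prod.snd := PySem.List.max?_mem hL2
        have h12 : m1 ≤ m2 := PySem.List.max?_isMax hL2 m1 (hp.mem_iff.mp hmem1)
        have h21 : m2 ≤ m1 := PySem.List.max?_isMax hL1 m2 (hp.mem_iff.mpr hmem2)
        simp [le_antisymm h12 h21]
  unfold pvDecide
  rw [hm]
  by_cases hle : (PySem.List.max? (L2.map Prod.snd) (fun v => v)).getD 0 ≤ 1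
  · simp [hle]
  · simp only [hle, if_false]
    set m := (PySem.List.max? (L2.map Prod.snd) (fun v => v)).getD 0 with hmdef
    have hf := h.filter (fun p => p.2 == m)
    have hlen : (L1.filter (fun p => p.2 == m)).length = (L2.filter (fun p => p.2 == m)).length :=
      hf.length_eq
    simp only [List.length_map, hlen]
    by_cases h1 : (L2.filter (fun p => p.2 == m)).length = 1
    · obtain ⟨a, ha⟩ := List.length_eq_one_iff.mp h1
      have h1' : (L1.filter (fun p => p.2 == m)).length = 1 := by rw [hlen, h1]
      obtain ⟨b, hb⟩ := List.length_eq_one_iff.mp h1'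
      rw [ha, hb] at hf ⊢
      have : b = a := by simpa using (List.perm_singleton.mp hf)
      simp [this]
    · simp [h1]

lemma bRuns_char (v : List String) (hs : v.Pairwise (fun a b : String => a ≤ b)) :
    (∀ p ∈ bRuns v, p.2 = (v.count p.1 : Int)) ∧
    ((bRuns v).map Prod.fst).Nodup ∧
    (∀ k, k ∈ (bRuns v).map Prod.fst ↔ k ∈ v) := by
  induction v using bRuns.induct with
  | case1 => simp [bRuns]
  | case2 x xs ih =>
    have hxle : ∀ y ∈ xs, x ≤ y := (List.pairwise_cons.mp hs).1
    have hpxs : xs.Pairwise (fun a b : String => a ≤ b) := (List.pairwise_cons.mp hs).2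
    have hd_sorted : (xs.dropWhile (fun y => y == x)).Pairwise (fun a b : String => a ≤ b) :=
      hpxs.sublist (List.dropWhile_sublist _)
    have ht : ∀ y ∈ xs.takeWhile (fun y => y == x), y = x := by
      intro y hy
      have := List.mem_takeWhile_imp hy
      simpa using this
    have htd : xs.takeWhile (fun y => y == x) ++ xs.dropWhile (fun y => y == x) = xs :=
      List.takeWhile_append_dropWhile
    have hxd : x ∉ xs.dropWhile (fun y => y == x) := by
      cases hd : xs.dropWhile (fun y => y == x) with
      | nil => simp
      | cons hh rest =>
        have hhne' : hh ≠ x := by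
          have := List.head?_dropWhile_not (fun y => (y == x)) xs
          rw [hd] at this; simpa using this
        have hsub : List.Sublist (hh :: rest) xs := by
          rw [← hd]; exact List.dropWhile_sublist _
        have hxh : x ≤ hh := hxle hh (hsub.subset (List.mem_cons_self))
        have hxlt : x < hh := lt_of_le_of_ne hxh (fun e => hhne' e.symm)
        intro hmem
        rcases List.mem_cons.mp hmem with h1 | h1
        · exact absurd h1.symm (ne_of_gt hxlt)
        · have hph : (hh :: rest).Pairwise (fun a b : String => a ≤ b) := hd ▸ hd_sorted
          have : hh ≤ x := (List.pairwise_cons.mp hph).1 x h1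
          exact absurd (lt_of_lt_of_le hxlt this) (lt_irrefl x)
    have hcx : (x :: xs).count x = (xs.takeWhile (fun y => y == x)).length + 1 := by
      have h0 : List.count x xs
          = List.count x (xs.takeWhile (fun y => y == x)) + List.count x (xs.dropWhile (fun y => y == x)) := by
        conv_lhs => rw [← htd]
        exact List.count_append ..
      have h1 : List.count x (xs.takeWhile (fun y => y == x)) = (xs.takeWhile (fun y => y == x)).length :=
        List.count_eq_length.mpr (fun b hb => (ht b hb).symm)
      have h2 : List.count x (xs.dropWhile (fun y => y == x)) = 0 := List.count_eq_zero.mpr hxd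
      rw [List.count_cons_self]
      omega
    have hck : ∀ k, k ≠ x → (x :: xs).count k = (xs.dropWhile (fun y => y == x)).count k := by
      intro k hk
      have h0 : List.count k xs
          = List.count k (xs.takeWhile (fun y => y == x)) + List.count k (xs.dropWhile (fun y => y == x)) := by
        conv_lhs => rw [← htd]
        exact List.count_append ..
      have h1 : List.count k (xs.takeWhile (fun y => y == x)) = 0 :=
        List.count_eq_zero.mpr (fun hmem => hk (ht k hmem))
      have h3 : List.count k (x :: xs) = List.count k xs := by
        rw [List.count_cons]; simp [Ne.symm hk]
      omega
    obtain ⟨ih1, ih2, ih3⟩ := ih hd_sorted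
    refine ⟨?_, ?_, ?_⟩
    · intro p hp
      rw [bRuns] at hp
      rcases List.mem_cons.mp hp with h1 | h1
      · subst h1; simp only
        rw [hcx]; push_cast; ring
      · have hp1d : p.1 ∈ xs.dropWhile (fun y => y == x) :=
          (ih3 p.1).mp (List.mem_map.mpr ⟨p, h1, rfl⟩)
        have hp1x : p.1 ≠ x := fun e => hxd (e ▸ hp1d)
        rw [ih1 p h1, hck p.1 hp1x]
    · rw [bRuns]
      simp only [List.map_cons, List.nodup_cons]
      exact ⟨fun hmem => hxd ((ih3 x).mp hmem), ih2⟩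
    · intro k
      rw [bRuns]
      simp only [List.map_cons, List.mem_cons, ih3]
      constructor
      · rintro (h1 | h1)
        · exact Or.inl h1
        · exact Or.inr ((htd ▸ (List.mem_append.mpr (Or.inr h1))))
      · rintro (h1 | h1)
        · exact Or.inl h1
        · rw [← htd] at h1
          rcases List.mem_append.mp h1 with h2 | h2
          · exact Or.inl (ht k h2)
          · exact Or.inr h2

-- ===== VERDICT (by name: the statement is the Claim_ definition above) =====
theorem most_frequent_answer_spec : Claim_equal_most_frequent_answer := by
  unfold Claim_equal_most_frequent_answer
  intro answers _
  unfold Spec_most_frequent_answer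
  match answers with
  | none => rfl
  | some l =>
    by_cases hl : l = []
    · simp [most_frequent_answer, most_frequent_answer_alt, hl]
    · by_cases hfe : l.filterMap id = []
      · have hall : ∀ a ∈ l, a = none := by simpa using hfe
        have hfe' : List.filterMap (fun x => x) l = ([] : List String) := hfe
        have hv0 : (PySem.List.sorted ([] : List String) (fun x : String => x) false) = [] :=
          (PySem.List.sorted_eq_nil_iff _ _ _).mpr rfl
        simp [most_frequent_answer, most_frequent_answer_alt, hl, hfe', hv0]
      · have hvne : PySem.List.sorted (l.filterMap id) (fun x => x) false ≠ [] := by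
          simpa [PySem.List.sorted_eq_nil_iff] using hfe
        have hall : ¬ ∀ a ∈ l, a = none := by
          intro hcontra
          exact hfe (by simpa using hcontra)
        have hA : most_frequent_answer (some l) = pvDecide (PySem.Dict.counter (l.filterMap id)).items := by
          simp [most_frequent_answer, pvDecide, hl, hall, PySem.Dict.values]
        have hB : most_frequent_answer_alt (some l)
            = pvDecide (bRuns (PySem.List.sorted (l.filterMap id) (fun x => x) false)) := by
          have hvne' : (PySem.List.sorted (List.filterMap (fun x => x) l) (fun x : String => x) false) ≠ [] := hvne
          simp [most_frequent_answer_alt, pvDecide, hl, hvne']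
        rw [hA, hB]
        apply pvDecide_perm
        set f := l.filterMap id with hfdef
        set vs := PySem.List.sorted f (fun x => x) false with hvs
        have hsorted : vs.Pairwise (fun a b : String => a ≤ b) := by
          have := PySem.List.sorted_pairwise f (fun x => x)
          simpa using this
        obtain ⟨c1, c2, c3⟩ := bRuns_char vs hsorted
        have hcount : ∀ k, vs.count k = f.count k := fun k =>
          (PySem.List.sorted_perm f (fun x => x) false).count_eq k
        have hruns : bRuns vs = ((bRuns vs).map Prod.fst).map (fun k => (k, (f.count k : Int))) := by
          rw [List.map_map]
          conv_lhs => rw [show bRuns vs = (bRuns vs).map id from (List.map_id _).symm]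
          apply List.map_congr_left
          intro p hp
          have : p.2 = (f.count p.1 : Int) := by rw [c1 p hp, hcount]
          simp [Function.comp]
          exact Prod.ext rfl this
        have hkeys : ((bRuns vs).map Prod.fst).Perm (PySem.Set.ofList f) := by
          rw [List.perm_ext_iff_of_nodup c2 (PySem.Set.nodup_ofList f)]
          intro a
          rw [c3, PySem.Set.mem_ofList, PySem.List.mem_sorted]
        rw [PySem.Dict.items_counter, hruns]
        exact (hkeys.map _).symm
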